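-- pv_equiv track=rewrite | github.com/mmartini-usgs/ADCPy | TRDIstuff/TRDIpd0tonetcdf.py | bitstrLE
-- ===== SOURCE A (Python) =====
-- def bitstrLE(byte): # make a bit string from little endian byte
--     # surely there's a better way to do this!!
--     bits = ""
--     for i in [7,6,5,4,3,2,1,0]:
--         if (byte >> i) & 1:
--             bits+="1"
--         else:
--             bits+="0"
--     return bits
-- ===== SOURCE B (Python) =====
-- def bitstrLE(byte):
--     return format(byte % 256, '08b')
-- ===== Notes on version B (the rewrite author's own statement) =====
-- stated objective: idiomatic
-- what changed: Replaces the manual 8-iteration bit-testing loop with a single closed-form conversion: reduce the input to its low byte with '% 256' and render it with format(..., '08b').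
import Mathlib
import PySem

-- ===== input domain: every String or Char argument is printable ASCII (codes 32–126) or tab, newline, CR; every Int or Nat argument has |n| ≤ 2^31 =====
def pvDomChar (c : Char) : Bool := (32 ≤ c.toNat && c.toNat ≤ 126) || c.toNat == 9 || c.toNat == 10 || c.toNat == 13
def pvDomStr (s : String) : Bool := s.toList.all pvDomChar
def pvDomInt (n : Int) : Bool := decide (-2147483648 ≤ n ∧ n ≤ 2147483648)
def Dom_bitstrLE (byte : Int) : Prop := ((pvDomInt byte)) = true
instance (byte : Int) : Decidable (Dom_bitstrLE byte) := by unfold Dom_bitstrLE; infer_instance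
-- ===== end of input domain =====

-- B replaces A's manual 8-step bit-testing loop with a closed-form conversion: reduce to the low byte with '% 256' and render with format(..., '08b') (idiomatic rewrite, same return value).

-- ===== PORT A =====
def bitstrLE (byte : Int) : String :=
  List.foldl (fun bits (i : Nat) =>
      if PySem.Int.band (byte >>> i) 1 ≠ 0 then bits ++ "1" else bits ++ "0")
    "" [7, 6, 5, 4, 3, 2, 1, 0]

-- ===== PORT B =====
-- format(m, '08b') for m ≥ 0 is the binary digits (PySem.Int.toBin = format(·,'b')) zero-padded to width 8 (PySem.Str.zfill)
def bitstrLE_alt (byte : Int) : String :=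
  PySem.Str.zfill (PySem.Int.toBin (PySem.Int.mod byte 256)) 8

-- ===== PRECONDITION & SPEC =====
def Spec_bitstrLE (byte : Int) (out : String) : Prop := out = bitstrLE_alt byte
instance (byte : Int) (out : String) : Decidable (Spec_bitstrLE byte out) := by unfold Spec_bitstrLE; infer_instance

-- ===== CLAIM (what is proved, stated in full; the proofs are below) =====
def Claim_equal_bitstrLE : Prop := ∀ (byte : Int), Dom_bitstrLE byte → Spec_bitstrLE byte (bitstrLE byte)

-- ===== LEMMAS AND PROOFS =====

-- each tested bit of A depends only on the low byte
lemma bit_mod (byte : Int) (i : Nat) (hi : i < 8) :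
    PySem.Int.band (byte >>> i) 1 = PySem.Int.band ((byte % 256) >>> i) 1 := by
  rw [PySem.Int.band_one, PySem.Int.band_one,
      PySem.Int.mod_eq_emod_of_pos (by norm_num), PySem.Int.mod_eq_emod_of_pos (by norm_num),
      Int.shiftRight_eq_div_pow, Int.shiftRight_eq_div_pow]
  interval_cases i <;> norm_num <;> omega

-- A only reads the low byte
lemma bitstrLE_mod (byte : Int) : bitstrLE byte = bitstrLE (byte % 256) := by
  simp only [bitstrLE, List.foldl]
  rw [bit_mod byte 7 (by norm_num), bit_mod byte 6 (by norm_num),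
      bit_mod byte 5 (by norm_num), bit_mod byte 4 (by norm_num),
      bit_mod byte 3 (by norm_num), bit_mod byte 2 (by norm_num),
      bit_mod byte 1 (by norm_num), bit_mod byte 0 (by norm_num)]

-- B only reads the low byte
lemma bitstrLE_alt_mod (byte : Int) : bitstrLE_alt byte = bitstrLE_alt (byte % 256) := by
  simp only [bitstrLE_alt, PySem.Int.mod_eq_emod_of_pos (show (0:Int) < 256 by norm_num)]
  rw [Int.emod_emod_of_dvd _ (by norm_num)]

set_option maxHeartbeats 2000000 in
lemma agree_low (r : Nat) (hr : r < 256) : bitstrLE (r : Int) = bitstrLE_alt (r : Int) := by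
  interval_cases r <;> decide

-- ===== VERDICT (by name: the statement is the Claim_ definition above) =====
theorem bitstrLE_spec : Claim_equal_bitstrLE := by
  intro byte _
  unfold Spec_bitstrLE
  rw [bitstrLE_mod, bitstrLE_alt_mod]
  have h0 : 0 ≤ byte % 256 := Int.emod_nonneg _ (by norm_num)
  have h1 : byte % 256 < 256 := Int.emod_lt_of_pos _ (by norm_num)
  have h : byte % 256 = ((byte % 256).toNat : Int) := (Int.toNat_of_nonneg h0).symm
  rw [h]
  exact agree_low _ (by omega)
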